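-- pv_equiv track=rewrite | github.com/rodrigorahal/advent-of-code-2023 | 18/lagoon.py | count
-- ===== SOURCE A (Python) =====
-- def count(seen, minr, maxr, minc, maxc):
--     C = 0
--     for r in range(minr, maxr):
--         for c in range(minc, maxc):
--             if (r, c) in seen:
--                 continue
--             C += 1
--     return C
-- ===== SOURCE B (Python) =====
-- def count(seen, minr, maxr, minc, maxc):
--     rows = max(0, maxr - minr)
--     cols = max(0, maxc - minc)
--     inside = {(r, c) for (r, c) in seen if minr <= r < maxr and minc <= c < maxc}
--     return rows * cols - len(inside)
-- ===== Notes on version B (the rewrite author's own statement) =====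
-- stated objective: alternative
-- what changed: Replaces the cell-by-cell double loop over the grid with a closed-form box area minus the count of distinct seen points inside the box, a single pass over seen.
import Mathlib
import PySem

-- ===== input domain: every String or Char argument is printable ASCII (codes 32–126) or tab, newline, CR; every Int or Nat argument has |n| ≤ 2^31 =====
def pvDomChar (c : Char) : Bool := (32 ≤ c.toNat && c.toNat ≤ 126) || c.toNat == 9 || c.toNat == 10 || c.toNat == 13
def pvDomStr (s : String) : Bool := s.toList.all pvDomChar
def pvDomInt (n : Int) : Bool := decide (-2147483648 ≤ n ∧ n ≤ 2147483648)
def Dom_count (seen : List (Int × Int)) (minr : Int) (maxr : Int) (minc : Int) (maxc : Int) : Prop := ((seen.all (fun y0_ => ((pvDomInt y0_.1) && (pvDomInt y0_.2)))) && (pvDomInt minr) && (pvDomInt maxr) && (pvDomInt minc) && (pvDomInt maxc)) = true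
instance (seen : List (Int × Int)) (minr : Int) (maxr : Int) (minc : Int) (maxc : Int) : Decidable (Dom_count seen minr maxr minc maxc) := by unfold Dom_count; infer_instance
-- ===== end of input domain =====

-- B computes the same value as area of the box minus the number of distinct seen points inside it (a single pass over seen instead of a per-cell double loop).

-- ===== PORT A =====
-- literal port of A: double loop over the grid, +1 for each cell not in seen
def count (seen : List (Int × Int)) (minr : Int) (maxr : Int) (minc : Int) (maxc : Int) : Int :=
  (PySem.List.pyRange minr maxr 1).foldl (fun C r =>
    (PySem.List.pyRange minc maxc 1).foldl (fun C c =>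
      if (r, c) ∈ seen then C else C + 1) C) 0

-- ===== PORT B =====
-- literal port of B: rows*cols minus the size of the set of seen points inside the box
def count_alt (seen : List (Int × Int)) (minr : Int) (maxr : Int) (minc : Int) (maxc : Int) : Int :=
  let rows := max 0 (maxr - minr)
  let cols := max 0 (maxc - minc)
  let inside : PySem.Set (Int × Int) :=
    PySem.Set.ofList (seen.filter (fun p => decide (minr ≤ p.1 ∧ p.1 < maxr ∧ minc ≤ p.2 ∧ p.2 < maxc)))
  rows * cols - inside.length

-- ===== PRECONDITION & SPEC =====
def Spec_count (seen : List (Int × Int)) (minr : Int) (maxr : Int) (minc : Int) (maxc : Int) (out : Int) : Prop := out = count_alt seen minr maxr minc maxc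
instance (seen : List (Int × Int)) (minr : Int) (maxr : Int) (minc : Int) (maxc : Int) (out : Int) : Decidable (Spec_count seen minr maxr minc maxc out) := by unfold Spec_count; infer_instance

-- ===== CLAIM (what is proved, stated in full; the proofs are below) =====
def Claim_equal_count : Prop := ∀ (seen : List (Int × Int)) (minr : Int) (maxr : Int) (minc : Int) (maxc : Int), Dom_count seen minr maxr minc maxc → Spec_count seen minr maxr minc maxc (count seen minr maxr minc maxc)

-- ===== LEMMAS AND PROOFS =====

-- the inner column loop counts cols minus the seen cells of row r inside the column range
lemma inner_loop_eq (seen : List (Int × Int)) (r minc maxc : Int) (C : Int) :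
    (PySem.List.pyRange minc maxc 1).foldl (fun C c => if (r, c) ∈ seen then C else C + 1) C
      = C + ((maxc - minc).toNat : Int)
          - ((seen.toFinset.filter (fun p => p.1 = r ∧ minc ≤ p.2 ∧ p.2 < maxc)).card : Int) := by
  generalize hn : (maxc - minc).toNat = n
  induction n generalizing minc C with
  | zero =>
    have hle : maxc ≤ minc := by omega
    rw [PySem.List.pyRange_one_eq_nil hle]
    have hemp : (seen.toFinset.filter (fun p => p.1 = r ∧ minc ≤ p.2 ∧ p.2 < maxc)) = ∅ := by
      apply Finset.filter_eq_empty_iff.mpr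
      intro p _ h
      omega
    simp [hemp]
  | succ n ih =>
    have hlt : minc < maxc := by omega
    rw [PySem.List.pyRange_one_cons hlt, List.foldl_cons]
    rw [ih (minc + 1) _ (by omega)]
    have hsplit : seen.toFinset.filter (fun p => p.1 = r ∧ minc ≤ p.2 ∧ p.2 < maxc)
        = seen.toFinset.filter (fun p => p = (r, minc))
          ∪ seen.toFinset.filter (fun p => p.1 = r ∧ minc + 1 ≤ p.2 ∧ p.2 < maxc) := by
      rw [← Finset.filter_or]
      apply Finset.filter_congr
      intro p _
      constructor
      · rintro ⟨h1, h2, h3⟩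
        by_cases hc : p.2 = minc
        · left; exact Prod.ext h1 hc
        · right; exact ⟨h1, by omega, h3⟩
      · rintro (h | ⟨h1, h2, h3⟩)
        · subst h; exact ⟨rfl, le_refl _, hlt⟩
        · exact ⟨h1, by omega, h3⟩
    have hdisj : Disjoint (seen.toFinset.filter (fun p => p = (r, minc)))
        (seen.toFinset.filter (fun p => p.1 = r ∧ minc + 1 ≤ p.2 ∧ p.2 < maxc)) := by
      rw [Finset.disjoint_left]
      intro p hp1 hp2
      simp only [Finset.mem_filter] at hp1 hp2
      have := hp1.2
      subst this
      omega
    rw [hsplit, Finset.card_union_of_disjoint hdisj]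
    have hcard1 : (seen.toFinset.filter (fun p => p = (r, minc))).card
        = if (r, minc) ∈ seen then 1 else 0 := by
      rw [Finset.filter_eq' seen.toFinset (r, minc)]
      by_cases hm : (r, minc) ∈ seen
      · simp [hm]
      · simp [hm]
    rw [hcard1]
    by_cases hm : (r, minc) ∈ seen
    · simp only [hm, if_true]
      push_cast
      omega
    · simp only [hm, if_false]
      push_cast
      omega

-- the full double loop equals rows*cols minus the number of distinct seen points in the box
lemma outer_loop_eq (seen : List (Int × Int)) (minr maxr minc maxc : Int) (C : Int) :
    (PySem.List.pyRange minr maxr 1).foldl (fun C r =>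
      (PySem.List.pyRange minc maxc 1).foldl (fun C c =>
        if (r, c) ∈ seen then C else C + 1) C) C
      = C + ((maxr - minr).toNat : Int) * ((maxc - minc).toNat : Int)
          - ((seen.toFinset.filter
                (fun p => minr ≤ p.1 ∧ p.1 < maxr ∧ minc ≤ p.2 ∧ p.2 < maxc)).card : Int) := by
  generalize hn : (maxr - minr).toNat = n
  induction n generalizing minr C with
  | zero =>
    have hle : maxr ≤ minr := by omega
    rw [PySem.List.pyRange_one_eq_nil hle]
    have hemp : (seen.toFinset.filter
        (fun p => minr ≤ p.1 ∧ p.1 < maxr ∧ minc ≤ p.2 ∧ p.2 < maxc)) = ∅ := by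
      apply Finset.filter_eq_empty_iff.mpr
      intro p _ h
      omega
    simp [hemp]
  | succ n ih =>
    have hlt : minr < maxr := by omega
    rw [PySem.List.pyRange_one_cons hlt, List.foldl_cons]
    rw [inner_loop_eq seen minr minc maxc C]
    rw [ih (minr + 1) _ (by omega)]
    have hsplit : seen.toFinset.filter
          (fun p => minr ≤ p.1 ∧ p.1 < maxr ∧ minc ≤ p.2 ∧ p.2 < maxc)
        = seen.toFinset.filter (fun p => p.1 = minr ∧ minc ≤ p.2 ∧ p.2 < maxc)
          ∪ seen.toFinset.filter
              (fun p => minr + 1 ≤ p.1 ∧ p.1 < maxr ∧ minc ≤ p.2 ∧ p.2 < maxc) := by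
      rw [← Finset.filter_or]
      apply Finset.filter_congr
      intro p _
      constructor
      · rintro ⟨h1, h2, h3⟩
        by_cases hc : p.1 = minr
        · left; exact ⟨hc, h3⟩
        · right; exact ⟨by omega, h2, h3⟩
      · rintro (⟨h1, h2⟩ | ⟨h1, h2, h3⟩)
        · exact ⟨by omega, by omega, h2⟩
        · exact ⟨by omega, h2, h3⟩
    have hdisj : Disjoint
        (seen.toFinset.filter (fun p => p.1 = minr ∧ minc ≤ p.2 ∧ p.2 < maxc))
        (seen.toFinset.filter
          (fun p => minr + 1 ≤ p.1 ∧ p.1 < maxr ∧ minc ≤ p.2 ∧ p.2 < maxc)) := by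
      rw [Finset.disjoint_left]
      intro p hp1 hp2
      simp only [Finset.mem_filter] at hp1 hp2
      omega
    rw [hsplit, Finset.card_union_of_disjoint hdisj]
    push_cast
    ring

-- B's set size is the same Finset cardinality
lemma alt_card_eq (seen : List (Int × Int)) (minr maxr minc maxc : Int) :
    ((PySem.Set.ofList (seen.filter
        (fun p => decide (minr ≤ p.1 ∧ p.1 < maxr ∧ minc ≤ p.2 ∧ p.2 < maxc)))).length : Int)
      = ((seen.toFinset.filter
            (fun p => minr ≤ p.1 ∧ p.1 < maxr ∧ minc ≤ p.2 ∧ p.2 < maxc)).card : Int) := by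
  set L := seen.filter (fun p => decide (minr ≤ p.1 ∧ p.1 < maxr ∧ minc ≤ p.2 ∧ p.2 < maxc)) with hL
  have hperm : (PySem.Set.ofList L).Perm L.dedup := by
    apply (List.perm_ext_iff_of_nodup (PySem.Set.nodup_ofList L) L.nodup_dedup).mpr
    intro x
    rw [PySem.Set.mem_ofList, List.mem_dedup]
  have h1 : (PySem.Set.ofList L).length = L.dedup.length := hperm.length_eq
  have h2 : L.toFinset = seen.toFinset.filter
      (fun p => minr ≤ p.1 ∧ p.1 < maxr ∧ minc ≤ p.2 ∧ p.2 < maxc) := by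
    rw [hL, List.toFinset_filter]
    apply Finset.filter_congr
    intro p _
    simp
  rw [h1, ← h2, List.card_toFinset]

-- ===== VERDICT (by name: the statement is the Claim_ definition above) =====
theorem count_spec : Claim_equal_count := by
  intro seen minr maxr minc maxc _
  unfold Spec_count count count_alt
  rw [outer_loop_eq, ← alt_card_eq]
  have h1 : max 0 (maxr - minr) = ((maxr - minr).toNat : Int) := by omega
  have h2 : max 0 (maxc - minc) = ((maxc - minc).toNat : Int) := by omega
  simp only [h1, h2]
  ring
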